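-- pv_equiv track=rewrite | github.com/tjm15/imagine-tpa | apps/api/tpa_api/ingestion/policy_ops.py | _block_id_from_section_ref
-- ===== SOURCE A (Python) =====
-- def _block_id_from_section_ref(section_ref: str | None) -> str | None:
--     if not isinstance(section_ref, str) or not section_ref:
--         return None
--     if section_ref.startswith("p"):
--         idx = 1
--         while idx < len(section_ref) and section_ref[idx].isdigit():
--             idx += 1
--         if idx < len(section_ref) and section_ref[idx] == "-":
--             return section_ref[idx + 1 :] or None
--     return section_ref
-- ===== SOURCE B (Python) =====
-- def _block_id_from_section_ref(section_ref: str | None) -> str | None: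
--     if not isinstance(section_ref, str) or not section_ref:
--         return None
--     if section_ref.startswith("p"):
--         prefix, sep, rest = section_ref[1:].partition("-")
--         if sep and (prefix == "" or prefix.isdigit()):
--             return rest or None
--     return section_ref
-- ===== Notes on version B (the rewrite author's own statement) =====
-- stated objective: simpler
-- what changed: Replaces the explicit index-scanning while loop with a single partition at the first dash of the tail followed by a digit-prefix validation.
import Mathlib
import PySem

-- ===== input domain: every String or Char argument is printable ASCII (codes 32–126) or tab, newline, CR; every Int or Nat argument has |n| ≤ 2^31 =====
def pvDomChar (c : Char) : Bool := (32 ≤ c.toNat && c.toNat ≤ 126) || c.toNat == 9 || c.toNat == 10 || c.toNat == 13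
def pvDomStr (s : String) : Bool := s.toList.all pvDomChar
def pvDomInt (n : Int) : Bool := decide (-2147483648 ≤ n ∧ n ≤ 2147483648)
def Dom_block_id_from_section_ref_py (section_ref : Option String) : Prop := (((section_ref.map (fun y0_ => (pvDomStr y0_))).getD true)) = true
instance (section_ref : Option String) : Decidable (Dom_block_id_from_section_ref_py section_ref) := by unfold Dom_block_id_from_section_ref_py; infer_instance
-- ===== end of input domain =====

-- ===== PORT A =====
-- B replaces A's index-scanning while loop with partition('-') plus a digit-prefix check (objective: simpler).

-- the while loop: idx advances over digits
def pvScanDigits (l : List Char) (idx : Nat) : Nat :=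
  if h : idx < l.length then
    if PySem.Chars.isdigit l[idx] then pvScanDigits l (idx + 1) else idx
  else idx
termination_by l.length - idx

def block_id_from_section_ref_py (section_ref : Option String) : Option String :=
  match section_ref with
  | none => none
  | some s =>
    if s.toList = [] then none
    else if PySem.Chars.startswith s.toList ['p'] then
      let idx := pvScanDigits s.toList 1
      match PySem.List.pyGet? s.toList (idx : Int) with
      | some c =>
        if c = '-' then
          let rest := PySem.List.slice s.toList (some ((idx : Int) + 1)) none
          if rest = [] then none else some (String.ofList rest)
        else some s
      | none => some s
    else some s

-- ===== PORT B =====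
def block_id_from_section_ref_py_alt (section_ref : Option String) : Option String :=
  match section_ref with
  | none => none
  | some s =>
    if s.toList = [] then none
    else if PySem.Chars.startswith s.toList ['p'] then
      -- prefix, sep, rest = section_ref[1:].partition('-')
      let t := s.toList.tail
      let pre := t.takeWhile (fun c => c ≠ '-')
      match t.dropWhile (fun c => c ≠ '-') with
      | [] => some s                -- sep empty: no match
      | _ :: rest =>
        if pre.isEmpty || PySem.Chars.strIsdigit pre then
          if rest = [] then none else some (String.ofList rest)
        else some s
    else some s

-- ===== PRECONDITION & SPEC =====
def Spec_block_id_from_section_ref_py (section_ref : Option String) (out : Option String) : Prop := out = block_id_from_section_ref_py_alt section_ref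
instance (section_ref : Option String) (out : Option String) : Decidable (Spec_block_id_from_section_ref_py section_ref out) := by unfold Spec_block_id_from_section_ref_py; infer_instance

-- ===== CLAIM (what is proved, stated in full; the proofs are below) =====
def Claim_equal_block_id_from_section_ref_py : Prop := ∀ (section_ref : Option String), Dom_block_id_from_section_ref_py section_ref → Spec_block_id_from_section_ref_py section_ref (block_id_from_section_ref_py section_ref)

-- ===== LEMMAS AND PROOFS =====
theorem pvScanDigits_eq (l : List Char) (idx : Nat) :
    pvScanDigits l idx = idx + ((l.drop idx).takeWhile PySem.Chars.isdigit).length := by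
  fun_induction pvScanDigits l idx with
  | case1 idx h hd ih =>
    rw [ih, List.drop_eq_getElem_cons h, List.takeWhile_cons_of_pos hd]
    simp; omega
  | case2 idx h hd =>
    rw [List.drop_eq_getElem_cons h, List.takeWhile_cons_of_neg hd]
    simp
  | case3 idx h =>
    rw [List.drop_eq_nil_of_le (by omega)]
    simp

-- the core: maximal-digit-run-then-'-' scan equals partition-then-validate, on the tail t
theorem pv_key (t : List Char) (fb : Option String) (f : List Char → Option String) :
    (match t[(t.takeWhile PySem.Chars.isdigit).length]? with
     | some c => if c = '-' then f (t.drop ((t.takeWhile PySem.Chars.isdigit).length + 1)) else fb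
     | none => fb)
    =
    (match t.dropWhile (fun c => c ≠ '-') with
     | [] => fb
     | _ :: rest =>
       if (t.takeWhile (fun c => c ≠ '-')).isEmpty || PySem.Chars.strIsdigit (t.takeWhile (fun c => c ≠ '-')) then
         f rest
       else fb) := by
  induction t with
  | nil => simp
  | cons c cs ih =>
    by_cases hc : c = '-'
    · subst hc
      rw [List.takeWhile_cons_of_neg (by decide)]
      simp
    · by_cases hd : PySem.Chars.isdigit c
      · rw [List.takeWhile_cons_of_pos hd]
        have h1 : (c :: cs)[(cs.takeWhile PySem.Chars.isdigit).length + 1]? =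
            cs[(cs.takeWhile PySem.Chars.isdigit).length]? := by simp
        rw [List.length_cons, h1, List.drop_succ_cons,
            List.dropWhile_cons_of_pos (by simp [hc]),
            List.takeWhile_cons_of_pos (by simp [hc])]
        rw [ih]
        cases hdw : cs.dropWhile (fun c => c ≠ '-') with
        | nil => rfl
        | cons d rest =>
          simp only [PySem.Chars.strIsdigit, List.isEmpty_cons, List.all_cons, hd,
            Bool.true_and, Bool.false_or, Bool.true_and]
          cases hpre : cs.takeWhile (fun c => c ≠ '-') with
          | nil => simp
          | cons e pre => simp
      · rw [List.takeWhile_cons_of_neg hd]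
        simp only [List.dropWhile_cons, List.takeWhile_cons, ne_eq, hc,
          not_false_eq_true, decide_true, if_true]
        rcases hdw : List.dropWhile (fun c => !decide (c = '-')) cs with _ | ⟨d, rest⟩ <;>
          simp [hdw, PySem.Chars.strIsdigit, hd, hc]

-- ===== VERDICT (by name: the statement is the Claim_ definition above) =====
theorem block_id_from_section_ref_py_spec : Claim_equal_block_id_from_section_ref_py := by
  intro section_ref _
  unfold Spec_block_id_from_section_ref_py block_id_from_section_ref_py block_id_from_section_ref_py_alt
  cases section_ref with
  | none => rfl
  | some s =>
    by_cases hnil : s.toList = []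
    · simp [hnil]
    · simp only [if_neg hnil]
      by_cases hp : PySem.Chars.startswith s.toList ['p'] = true
      · simp only [hp]
        obtain ⟨t, ht⟩ : ∃ t, s.toList = 'p' :: t := by
          rcases (PySem.Chars.startswith_iff s.toList ['p']).1 hp with ⟨u, hu⟩
          exact ⟨u, hu.symm⟩
        have hscan : pvScanDigits s.toList 1 = 1 + (t.takeWhile PySem.Chars.isdigit).length := by
          rw [pvScanDigits_eq, ht]; rfl
        rw [hscan]
        have hget : PySem.List.pyGet? s.toList ((1 + (t.takeWhile PySem.Chars.isdigit).length : Nat) : Int)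
            = t[(t.takeWhile PySem.Chars.isdigit).length]? := by
          rw [PySem.List.pyGet?_natCast, ht]
          simp [Nat.add_comm]
        have hslice : PySem.List.slice s.toList (some (((1 + (t.takeWhile PySem.Chars.isdigit).length : Nat) : Int) + 1)) none
            = t.drop ((t.takeWhile PySem.Chars.isdigit).length + 1) := by
          have h2 : ((1 + (t.takeWhile PySem.Chars.isdigit).length : Nat) : Int) + 1
              = ((1 + (t.takeWhile PySem.Chars.isdigit).length + 1 : Nat) : Int) := by push_cast; ring
          rw [h2, PySem.List.slice_from_natCast, ht]
          have h3 : 1 + (t.takeWhile PySem.Chars.isdigit).length + 1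
              = ((t.takeWhile PySem.Chars.isdigit).length + 1) + 1 := by omega
          rw [h3, List.drop_succ_cons]
        rw [hget, hslice]
        have htail : s.toList.tail = t := by simp [ht]
        rw [htail]
        exact pv_key t (some s) (fun r => if r = [] then none else some (String.ofList r))
      · simp [hp]
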